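-- pv_equiv track=rewrite | github.com/yuridekim/Speech-Recognition | program files/speechRecognition.py | update_a
-- ===== SOURCE A (Python) =====
-- def update_a(first,second):
--     result=[]
--     firstLen=len(first)
--     secondLen=len(second)
--     if(firstLen==0):
--         for i in range(0,len(second)):
--             result=second
--     else:
--         newALen=firstLen+secondLen-2
--         for row in range(0,newALen):
--             temp=[]
--             for col in range(0,newALen):
--                 if row<firstLen-1 and col<firstLen-1:
--                     temp.append(first[row][col])
--                 elif row==firstLen-2:
--                     temp.append(first[firstLen-2][firstLen-1]*second[0][col-firstLen+2])
--                 elif row>=firstLen-2 and col>=firstLen-1: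
--                     temp.append(second[row-firstLen+2][col-firstLen+2])
--                 else:
--                     temp.append(0)
--             result.append(temp)
--     return result
-- ===== SOURCE B (Python) =====
-- def update_a(first, second):
--     # Region fill: top-left block of `first`, one coupling row, bottom-right
--     # block of `second`, instead of a per-cell branch chain.
--     f = len(first)
--     if f == 0:
--         return second
--     s = len(second)
--     n = f + s - 2
--     w = min(f - 1, n)
--     top = [first[r][:w] + [0] * (n - w) for r in range(f - 2)]
--     if f >= 2 and s >= 1:
--         row = first[f - 2][:f - 1]
--         if s >= 2:
--             k = first[f - 2][f - 1]
--             row = row + [k * x for x in second[0][1:s]]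
--         mid = [row]
--     else:
--         mid = []
--     bot = [[0] * (f - 1) + second[r - f + 2][1:s] for r in range(max(f - 1, 0), n)]
--     return top + mid + bot
-- ===== Notes on version B (the rewrite author's own statement) =====
-- stated objective: faster
-- what changed: B builds the block matrix by three region fills (top-left rows of `first` padded with zeros, one guarded coupling row, bottom-right shifted rows of `second` behind a zero prefix) using slices, instead of A's n-by-n double loop with a four-way branch chain per cell.
import Mathlib
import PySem

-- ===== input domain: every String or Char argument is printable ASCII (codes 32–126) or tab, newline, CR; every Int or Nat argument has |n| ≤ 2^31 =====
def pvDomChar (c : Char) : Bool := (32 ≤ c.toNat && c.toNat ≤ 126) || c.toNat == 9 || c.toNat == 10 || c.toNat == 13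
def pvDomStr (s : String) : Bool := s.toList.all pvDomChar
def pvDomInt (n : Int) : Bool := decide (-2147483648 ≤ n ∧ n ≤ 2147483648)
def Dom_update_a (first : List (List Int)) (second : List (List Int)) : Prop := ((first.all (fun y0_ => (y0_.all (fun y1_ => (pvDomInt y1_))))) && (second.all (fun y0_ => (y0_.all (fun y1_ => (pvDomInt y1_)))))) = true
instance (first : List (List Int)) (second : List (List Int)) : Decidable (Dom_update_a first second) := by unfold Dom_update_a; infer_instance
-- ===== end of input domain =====

-- B replaces A's per-cell four-way branch chain with three region fills (top-left
-- block copy, one coupling row, bottom-right block copy) built from slices;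
-- constant-factor faster (bulk slice copies instead of per-cell branching).

-- ===== PORT A =====
def update_a (first : List (List Int)) (second : List (List Int)) : List (List Int) :=
  let result : List (List Int) := []
  let firstLen : Int := first.length
  let secondLen : Int := second.length
  if firstLen = 0 then
    (PySem.List.pyRange 0 secondLen 1).foldl (fun _ _ => second) result
  else
    let newALen : Int := firstLen + secondLen - 2
    (PySem.List.pyRange 0 newALen 1).foldl (fun result row =>
      let temp := (PySem.List.pyRange 0 newALen 1).foldl (fun temp col =>
        if row < firstLen - 1 ∧ col < firstLen - 1 then
          temp ++ [PySem.List.pyGetD (PySem.List.pyGetD first row []) col 0]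
        else if row = firstLen - 2 then
          temp ++ [PySem.List.pyGetD (PySem.List.pyGetD first (firstLen - 2) []) (firstLen - 1) 0 *
                   PySem.List.pyGetD (PySem.List.pyGetD second 0 []) (col - firstLen + 2) 0]
        else if firstLen - 2 ≤ row ∧ firstLen - 1 ≤ col then
          temp ++ [PySem.List.pyGetD (PySem.List.pyGetD second (row - firstLen + 2) []) (col - firstLen + 2) 0]
        else
          temp ++ [(0 : Int)]) []
      result ++ [temp]) result

-- ===== PORT B =====
def update_a_alt (first : List (List Int)) (second : List (List Int)) : List (List Int) :=
  let f : Int := first.length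
  if f = 0 then second
  else
    let s : Int := second.length
    let n : Int := f + s - 2
    let w : Int := min (f - 1) n
    let top := (PySem.List.pyRange 0 (f - 2) 1).map (fun r =>
      PySem.List.slice (PySem.List.pyGetD first r []) none (some w) ++
      List.replicate (n - w).toNat (0 : Int))
    let mid : List (List Int) :=
      if 2 ≤ f ∧ 1 ≤ s then
        let row0 := PySem.List.slice (PySem.List.pyGetD first (f - 2) []) none (some (f - 1))
        let row := if 2 ≤ s then
            let k := PySem.List.pyGetD (PySem.List.pyGetD first (f - 2) []) (f - 1) 0
            row0 ++ (PySem.List.slice (PySem.List.pyGetD second 0 []) (some 1) (some s)).map (fun x => k * x)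
          else row0
        [row]
      else []
    let bot := (PySem.List.pyRange (max (f - 1) 0) n 1).map (fun r =>
      List.replicate (f - 1).toNat (0 : Int) ++
      PySem.List.slice (PySem.List.pyGetD second (r - f + 2) []) (some 1) (some s))
    top ++ mid ++ bot

-- ===== PRECONDITION & SPEC =====
-- Pre_ holds exactly when A's indexing stays in range (otherwise the Python A
-- raises IndexError): rows of the copied top-left block are long enough, tail
-- rows of `second` are long enough when they are read, and the coupling row can
-- read first[f-2][f-1] and second[0].
def Pre_update_a (first : List (List Int)) (second : List (List Int)) : Prop :=
  first.length = 0 ∨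
  ( (∀ r ∈ first.take (min (first.length - 1) (first.length + second.length - 2)),
        min (first.length - 1) (first.length + second.length - 2) ≤ r.length) ∧
    (2 ≤ second.length → ∀ r ∈ second.tail, second.length ≤ r.length) ∧
    (2 ≤ first.length → 2 ≤ second.length →
        first.length ≤ (first.getD (first.length - 2) []).length ∧
        second.length ≤ (second.getD 0 []).length) )
instance (first : List (List Int)) (second : List (List Int)) : Decidable (Pre_update_a first second) := by unfold Pre_update_a; infer_instance

def pvWitness_update_a : List (List Int) × List (List Int) := ([[1, 2], [3, 4]], [[5, 6], [7, 8]])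

def Spec_update_a (first : List (List Int)) (second : List (List Int)) (out : List (List Int)) : Prop := out = update_a_alt first second
instance (first : List (List Int)) (second : List (List Int)) (out : List (List Int)) : Decidable (Spec_update_a first second out) := by unfold Spec_update_a; infer_instance

-- ===== CLAIM (what is proved, stated in full; the proofs are below) =====
def Claim_equal_update_a : Prop := ∀ (first : List (List Int)) (second : List (List Int)), Dom_update_a first second → Pre_update_a first second → Spec_update_a first second (update_a first second)

-- ===== LEMMAS AND PROOFS =====

-- A's per-cell value, as a standalone function of the two (Int) loop indices.
def cellA (first second : List (List Int)) (row col : Int) : Int :=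
  if row < (first.length : Int) - 1 ∧ col < (first.length : Int) - 1 then
    PySem.List.pyGetD (PySem.List.pyGetD first row []) col 0
  else if row = (first.length : Int) - 2 then
    PySem.List.pyGetD (PySem.List.pyGetD first ((first.length : Int) - 2) []) ((first.length : Int) - 1) 0 *
      PySem.List.pyGetD (PySem.List.pyGetD second 0 []) (col - (first.length : Int) + 2) 0
  else if (first.length : Int) - 2 ≤ row ∧ (first.length : Int) - 1 ≤ col then
    PySem.List.pyGetD (PySem.List.pyGetD second (row - (first.length : Int) + 2) []) (col - (first.length : Int) + 2) 0
  else 0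

lemma foldl_const_fun {α β : Type} (l : List α) (x init : β) :
    l.foldl (fun _ _ => x) init = if l = [] then init else x := by
  induction l generalizing init with
  | nil => rfl
  | cons a t ih => simp [ih]

lemma pyGetD_int_eq_getD {α : Type} (xs : List α) (d : α) (a : Int) (k : Nat) (h : a = (k : Int)) :
    PySem.List.pyGetD xs a d = xs.getD k d := by
  subst h; exact PySem.List.pyGetD_natCast ..

lemma map_pyGetD_range_take (xs : List Int) (b : Int) (h : b.toNat ≤ xs.length) :
    (PySem.List.pyRange 0 b 1).map (fun c => PySem.List.pyGetD xs c 0) = xs.take b.toNat := by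
  rw [PySem.List.pyRange_one, List.map_map]
  apply List.ext_getElem
  · simp; omega
  · intro j h1 h2
    simp only [List.getElem_map, List.getElem_range, Function.comp_apply, zero_add,
      PySem.List.pyGetD_natCast, List.getElem_take]
    rw [List.getD_eq_getElem _ _ (by simp at h1 ⊢; omega)]

-- A, rewritten as a map of maps of cellA over the two index ranges.
lemma A_unfold (first second : List (List Int)) (hf : first.length ≠ 0) :
    update_a first second =
      (PySem.List.pyRange 0 ((first.length : Int) + (second.length : Int) - 2) 1).map (fun row =>
        (PySem.List.pyRange 0 ((first.length : Int) + (second.length : Int) - 2) 1).map (fun col =>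
          cellA first second row col)) := by
  have hf' : ¬ ((first.length : Int) = 0) := by exact_mod_cast hf
  simp only [update_a, if_neg hf']
  rw [PySem.List.foldl_append_singleton_eq_map, List.nil_append]
  refine List.map_congr_left fun row _ => ?_
  have hbody : (fun (temp : List Int) (col : Int) =>
      if row < (first.length : Int) - 1 ∧ col < (first.length : Int) - 1 then
        temp ++ [PySem.List.pyGetD (PySem.List.pyGetD first row []) col 0]
      else if row = (first.length : Int) - 2 then
        temp ++ [PySem.List.pyGetD (PySem.List.pyGetD first ((first.length : Int) - 2) []) ((first.length : Int) - 1) 0 *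
                 PySem.List.pyGetD (PySem.List.pyGetD second 0 []) (col - (first.length : Int) + 2) 0]
      else if (first.length : Int) - 2 ≤ row ∧ (first.length : Int) - 1 ≤ col then
        temp ++ [PySem.List.pyGetD (PySem.List.pyGetD second (row - (first.length : Int) + 2) []) (col - (first.length : Int) + 2) 0]
      else temp ++ [(0 : Int)]) =
      (fun temp col => temp ++ [cellA first second row col]) := by
    funext temp col
    simp only [cellA]
    split_ifs <;> rfl
  rw [hbody, PySem.List.foldl_append_singleton_eq_map, List.nil_append]

-- Rows strictly above the coupling row: a prefix of first's row, padded with zeros.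
lemma rowA_top (first second : List (List Int)) (r : Int) (i : Nat)
    (hr : r = (i : Int))
    (hi : i + 2 < first.length)
    (hlen : min (first.length - 1) (first.length + second.length - 2) ≤ (first.getD i []).length) :
    ((PySem.List.pyRange 0 ((first.length : Int) + (second.length : Int) - 2) 1).map (fun col =>
        cellA first second r col)) =
      PySem.List.slice (PySem.List.pyGetD first r [])
          none (some (min ((first.length : Int) - 1) ((first.length : Int) + (second.length : Int) - 2))) ++
        List.replicate ((((first.length : Int) + (second.length : Int) - 2) -
          min ((first.length : Int) - 1) ((first.length : Int) + (second.length : Int) - 2)).toNat) (0 : Int) := by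
  subst hr
  rw [PySem.List.pyGetD_natCast, PySem.List.slice_to _ (by omega)]
  rw [PySem.List.pyRange_one_append 0
      (min ((first.length : Int) - 1) ((first.length : Int) + (second.length : Int) - 2))
      ((first.length : Int) + (second.length : Int) - 2) (by omega) (by omega)]
  rw [List.map_append]
  congr 1
  · have h1 : ∀ c ∈ PySem.List.pyRange 0
        (min ((first.length : Int) - 1) ((first.length : Int) + (second.length : Int) - 2)) 1,
        cellA first second (i : Int) c = PySem.List.pyGetD (first.getD i []) c 0 := by
      intro c hc
      rw [PySem.List.mem_pyRange_one] at hc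
      simp only [cellA]
      rw [if_pos ⟨by omega, by omega⟩, PySem.List.pyGetD_natCast]
    rw [List.map_congr_left h1, map_pyGetD_range_take _ _ (by omega)]
  · have h2 : ∀ c ∈ PySem.List.pyRange
        (min ((first.length : Int) - 1) ((first.length : Int) + (second.length : Int) - 2))
        ((first.length : Int) + (second.length : Int) - 2) 1,
        cellA first second (i : Int) c = (0 : Int) := by
      intro c hc
      rw [PySem.List.mem_pyRange_one] at hc
      simp only [cellA]
      rw [if_neg (by omega), if_neg (by omega), if_neg (by omega)]
    rw [List.map_congr_left h2]
    rw [show (fun _ : Int => (0 : Int)) = Function.const Int (0 : Int) from rfl, List.map_const,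
      PySem.List.length_pyRange_one]

-- The coupling row when second has a single row: just the prefix of first's row.
lemma rowA_mid1 (first second : List (List Int))
    (hF : 2 ≤ first.length) (hS : second.length = 1)
    (hlen : first.length - 1 ≤ (first.getD (first.length - 2) []).length) :
    ((PySem.List.pyRange 0 ((first.length : Int) + (second.length : Int) - 2) 1).map (fun col =>
        cellA first second ((first.length : Int) - 2) col)) =
      PySem.List.slice (PySem.List.pyGetD first ((first.length : Int) - 2) [])
        none (some ((first.length : Int) - 1)) := by
  rw [pyGetD_int_eq_getD first [] _ (first.length - 2) (by omega), PySem.List.slice_to _ (by omega)]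
  rw [show ((first.length : Int) + (second.length : Int) - 2) = (first.length : Int) - 1 from by omega]
  have h1 : ∀ c ∈ PySem.List.pyRange 0 ((first.length : Int) - 1) 1,
      cellA first second ((first.length : Int) - 2) c =
        PySem.List.pyGetD (first.getD (first.length - 2) []) c 0 := by
    intro c hc
    rw [PySem.List.mem_pyRange_one] at hc
    simp only [cellA]
    rw [if_pos ⟨by omega, by omega⟩, pyGetD_int_eq_getD first [] _ (first.length - 2) (by omega)]
  rw [List.map_congr_left h1, map_pyGetD_range_take _ _ (by omega)]

-- The coupling row when second has at least two rows.
lemma rowA_mid2 (first second : List (List Int))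
    (hF : 2 ≤ first.length) (hS : 2 ≤ second.length)
    (hlenF : first.length ≤ (first.getD (first.length - 2) []).length)
    (hlenS : second.length ≤ (second.getD 0 []).length) :
    ((PySem.List.pyRange 0 ((first.length : Int) + (second.length : Int) - 2) 1).map (fun col =>
        cellA first second ((first.length : Int) - 2) col)) =
      PySem.List.slice (PySem.List.pyGetD first ((first.length : Int) - 2) [])
          none (some ((first.length : Int) - 1)) ++
        (PySem.List.slice (PySem.List.pyGetD second 0 []) (some 1) (some (second.length : Int))).map
          (fun x => PySem.List.pyGetD (PySem.List.pyGetD first ((first.length : Int) - 2) []) ((first.length : Int) - 1) 0 * x) := by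
  rw [PySem.List.pyRange_one_append 0 ((first.length : Int) - 1)
      ((first.length : Int) + (second.length : Int) - 2) (by omega) (by omega)]
  rw [List.map_append]
  congr 1
  · rw [pyGetD_int_eq_getD first [] _ (first.length - 2) (by omega), PySem.List.slice_to _ (by omega)]
    have h1 : ∀ c ∈ PySem.List.pyRange 0 ((first.length : Int) - 1) 1,
        cellA first second ((first.length : Int) - 2) c =
          PySem.List.pyGetD (first.getD (first.length - 2) []) c 0 := by
      intro c hc
      rw [PySem.List.mem_pyRange_one] at hc
      simp only [cellA]
      rw [if_pos ⟨by omega, by omega⟩, pyGetD_int_eq_getD first [] _ (first.length - 2) (by omega)]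
    rw [List.map_congr_left h1, map_pyGetD_range_take _ _ (by omega)]
  · rw [pyGetD_int_eq_getD second [] (0 : Int) 0 (by simp),
      PySem.List.slice_toNat _ (by omega) (by omega)]
    apply List.ext_getElem
    · simp only [List.length_map, PySem.List.length_pyRange_one, List.length_take,
        List.length_drop]
      omega
    · intro t h1 h2
      simp only [List.length_map, PySem.List.length_pyRange_one] at h1
      simp only [List.getElem_map, PySem.List.getElem_pyRange_one, List.getElem_take,
        List.getElem_drop]
      simp only [cellA]
      rw [if_neg (by omega)]
      simp only [if_true]
      rw [pyGetD_int_eq_getD second [] (0 : Int) 0 (by simp)]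
      rw [pyGetD_int_eq_getD (second.getD 0 []) 0 _ ((1 : Int).toNat + t) (by omega)]
      rw [List.getD_eq_getElem _ _ (by omega)]

-- Rows below the coupling row: zeros, then a shifted row of second.
lemma rowA_bot (first second : List (List Int)) (r : Int) (m : Nat)
    (hF : 1 ≤ first.length)
    (hr : r = (first.length : Int) - 1 + (m : Int))
    (hm : first.length - 1 + m < first.length + second.length - 2)
    (hlen : second.length ≤ (second.getD (m + 1) []).length) :
    ((PySem.List.pyRange 0 ((first.length : Int) + (second.length : Int) - 2) 1).map (fun col =>
        cellA first second r col)) =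
      List.replicate ((first.length : Int) - 1).toNat (0 : Int) ++
        PySem.List.slice (PySem.List.pyGetD second (r - (first.length : Int) + 2) [])
          (some 1) (some (second.length : Int)) := by
  subst hr
  rw [pyGetD_int_eq_getD second [] _ (m + 1) (by push_cast; omega),
    PySem.List.slice_toNat _ (by omega) (by omega)]
  rw [PySem.List.pyRange_one_append 0 ((first.length : Int) - 1)
      ((first.length : Int) + (second.length : Int) - 2) (by omega) (by omega)]
  rw [List.map_append]
  congr 1
  · have h1 : ∀ c ∈ PySem.List.pyRange 0 ((first.length : Int) - 1) 1,
        cellA first second ((first.length : Int) - 1 + (m : Int)) c = (0 : Int) := by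
      intro c hc
      rw [PySem.List.mem_pyRange_one] at hc
      simp only [cellA]
      rw [if_neg (by omega), if_neg (by omega), if_neg (by omega)]
    rw [List.map_congr_left h1]
    rw [show (fun _ : Int => (0 : Int)) = Function.const Int (0 : Int) from rfl, List.map_const,
      PySem.List.length_pyRange_one]
    congr 1
    omega
  · apply List.ext_getElem
    · simp only [List.length_map, PySem.List.length_pyRange_one, List.length_take,
        List.length_drop]
      omega
    · intro t h1 h2
      simp only [List.length_map, PySem.List.length_pyRange_one] at h1
      simp only [List.getElem_map, PySem.List.getElem_pyRange_one, List.getElem_take,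
        List.getElem_drop]
      simp only [cellA]
      rw [if_neg (by omega), if_neg (by omega), if_pos ⟨by omega, by omega⟩]
      rw [pyGetD_int_eq_getD second [] _ (m + 1) (by push_cast; omega)]
      rw [pyGetD_int_eq_getD (second.getD (m + 1) []) 0 _ ((1 : Int).toNat + t) (by omega)]
      rw [List.getD_eq_getElem _ _ (by omega)]

-- ===== VERDICT (by name: the statement is the Claim_ definition above) =====
theorem update_a_spec : Claim_equal_update_a := by
  intro first second _ hpre
  unfold Spec_update_a
  by_cases hf : first.length = 0
  · have h0 : first = [] := List.length_eq_zero_iff.mp hf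
    subst h0
    have hA : update_a [] second = second := by
      simp only [update_a, List.length_nil, Nat.cast_zero, if_true]
      rw [foldl_const_fun]
      cases second with
      | nil => simp [PySem.List.pyRange_one_eq_nil]
      | cons h t =>
        rw [if_neg (by
          rw [PySem.List.pyRange_one_cons (by exact_mod_cast Nat.succ_pos t.length)]
          simp)]
    have hB : update_a_alt [] second = second := by
      simp only [update_a_alt, List.length_nil, Nat.cast_zero, if_true]
    rw [hA, hB]
  · have hf' : ¬ ((first.length : Int) = 0) := by exact_mod_cast hf
    obtain ⟨hp1, hp2, hp3⟩ := hpre.resolve_left hf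
    have hfirstlen : ∀ k, k < min (first.length - 1) (first.length + second.length - 2) →
        min (first.length - 1) (first.length + second.length - 2) ≤ (first.getD k []).length := by
      intro k hk
      refine hp1 _ ?_
      rw [List.getD_eq_getElem _ _ (by omega)]
      have h1 : k < (first.take (min (first.length - 1) (first.length + second.length - 2))).length := by
        simp only [List.length_take]; omega
      have := List.getElem_mem h1
      rwa [List.getElem_take] at this
    have hseclen : ∀ k, k + 1 < second.length → second.length ≤ (second.getD (k + 1) []).length := by
      intro k hk
      refine hp2 (by omega) _ ?_
      rw [List.getD_eq_getElem _ _ (by omega)]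
      have h1 : k < second.tail.length := by simp only [List.length_tail]; omega
      have := List.getElem_mem h1
      rwa [List.getElem_tail] at this
    rw [A_unfold first second hf]
    simp only [update_a_alt, if_neg hf']
    rw [show max ((first.length : Int) - 1) 0 = (first.length : Int) - 1 from by omega]
    set rowfun := fun row => ((PySem.List.pyRange 0
        ((first.length : Int) + (second.length : Int) - 2) 1).map (fun col =>
          cellA first second row col)) with hrf
    by_cases hF2 : 2 ≤ first.length
    · by_cases hS1 : 1 ≤ second.length
      · rw [if_pos ⟨by omega, by omega⟩]
        by_cases hS2 : 2 ≤ second.length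
        · -- F ≥ 2, S ≥ 2: all three regions
          rw [if_pos (by omega : (2 : Int) ≤ (second.length : Int))]
          rw [PySem.List.pyRange_one_append 0 ((first.length : Int) - 2)
            ((first.length : Int) + (second.length : Int) - 2) (by omega) (by omega)]
          rw [PySem.List.pyRange_one_append ((first.length : Int) - 2) ((first.length : Int) - 1)
            ((first.length : Int) + (second.length : Int) - 2) (by omega) (by omega)]
          have hsing : PySem.List.pyRange ((first.length : Int) - 2) ((first.length : Int) - 1) =
              [(first.length : Int) - 2] := by
            rw [show (first.length : Int) - 1 = (first.length : Int) - 2 + 1 from by omega]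
            exact PySem.List.pyRange_one_singleton _
          rw [hsing]
          simp only [List.map_append, List.map_cons, List.map_nil, List.append_assoc]
          congr 1
          · refine List.map_congr_left fun r hmem => ?_
            rw [PySem.List.mem_pyRange_one] at hmem
            rw [hrf]
            exact rowA_top first second r r.toNat (by omega) (by omega)
              (hfirstlen r.toNat (by omega))
          congr 1
          · rw [hrf]
            exact congrArg (fun z => [z])
              (rowA_mid2 first second hF2 hS2 ((hp3 hF2 hS2).1) ((hp3 hF2 hS2).2))
          · refine List.map_congr_left fun r hmem => ?_
            rw [PySem.List.mem_pyRange_one] at hmem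
            rw [hrf]
            exact rowA_bot first second r (r - ((first.length : Int) - 1)).toNat (by omega)
              (by omega) (by omega) (hseclen _ (by omega))
        · -- F ≥ 2, S = 1: top rows and the coupling row only
          have hS1' : second.length = 1 := by omega
          rw [if_neg (by omega : ¬ ((2 : Int) ≤ (second.length : Int)))]
          have hbotnil : PySem.List.pyRange ((first.length : Int) - 1)
              ((first.length : Int) + (second.length : Int) - 2) = [] :=
            PySem.List.pyRange_one_eq_nil (by omega)
          rw [hbotnil]
          rw [PySem.List.pyRange_one_append 0 ((first.length : Int) - 2)
            ((first.length : Int) + (second.length : Int) - 2) (by omega) (by omega)]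
          have hsing : PySem.List.pyRange ((first.length : Int) - 2)
              ((first.length : Int) + (second.length : Int) - 2) = [(first.length : Int) - 2] := by
            rw [show (first.length : Int) + (second.length : Int) - 2 =
              (first.length : Int) - 2 + 1 from by omega]
            exact PySem.List.pyRange_one_singleton _
          rw [hsing]
          simp only [List.map_append, List.map_cons, List.map_nil, List.append_nil]
          congr 1
          · refine List.map_congr_left fun r hmem => ?_
            rw [PySem.List.mem_pyRange_one] at hmem
            rw [hrf]
            exact rowA_top first second r r.toNat (by omega) (by omega)
              (hfirstlen r.toNat (by omega))
          · rw [hrf]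
            exact congrArg (fun z => [z]) (rowA_mid1 first second hF2 hS1' (by
              have := hfirstlen (first.length - 2) (by omega)
              omega))
      · -- F ≥ 2, S = 0: only top rows
        have hS0 : second.length = 0 := by omega
        rw [if_neg (by omega)]
        have hbotnil : PySem.List.pyRange ((first.length : Int) - 1)
            ((first.length : Int) + (second.length : Int) - 2) = [] :=
          PySem.List.pyRange_one_eq_nil (by omega)
        rw [hbotnil]
        have hrange : PySem.List.pyRange 0 ((first.length : Int) + (second.length : Int) - 2) =
            PySem.List.pyRange 0 ((first.length : Int) - 2) := by
          rw [show (first.length : Int) + (second.length : Int) - 2 =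
            (first.length : Int) - 2 from by omega]
        rw [hrange]
        simp only [List.map_nil, List.append_nil]
        refine List.map_congr_left fun r hmem => ?_
        rw [PySem.List.mem_pyRange_one] at hmem
        rw [hrf]
        exact rowA_top first second r r.toNat (by omega) (by omega)
          (hfirstlen r.toNat (by omega))
    · -- F = 1: only bottom rows
      have hF1 : first.length = 1 := by omega
      rw [if_neg (by omega)]
      have htopnil : PySem.List.pyRange 0 ((first.length : Int) - 2) = [] :=
        PySem.List.pyRange_one_eq_nil (by omega)
      rw [htopnil]
      have hrange : PySem.List.pyRange ((first.length : Int) - 1)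
          ((first.length : Int) + (second.length : Int) - 2) =
          PySem.List.pyRange 0 ((first.length : Int) + (second.length : Int) - 2) := by
        rw [show (first.length : Int) - 1 = 0 from by omega]
      rw [hrange]
      simp only [List.map_nil, List.nil_append]
      refine List.map_congr_left fun r hmem => ?_
      rw [PySem.List.mem_pyRange_one] at hmem
      rw [hrf]
      exact rowA_bot first second r r.toNat (by omega) (by omega) (by omega)
        (hseclen _ (by omega))
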